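-- pv_equiv track=rewrite | github.com/neica200/Qr_reader_and_writer | qr.py | eval_secvente
-- ===== SOURCE A (Python) =====
-- def eval_secvente(linie):
--
--     lungime = len(linie)
--     penalizare = 0
--     count = 1
--     for i in range(1, lungime):
--         if linie[i] == linie[i - 1]:
--             count += 1
--             if count >= 5:
--                 penalizare += 1 if count == 5 else 1
--         else:
--             count = 1  # Resetez contorul dacă bitul diferă
--     return penalizare
-- ===== SOURCE B (Python) =====
-- def eval_secvente(linie):
--     # Split into maximal runs of equal elements; each run of length L adds max(0, L - 4).
--     total = 0
--     i = 0
--     n = len(linie)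
--     while i < n:
--         j = i
--         while j < n and linie[j] == linie[i]:
--             j += 1
--         total += max((j - i) - 4, 0)
--         i = j
--     return total
-- ===== Notes on version B (the rewrite author's own statement) =====
-- stated objective: simpler
-- what changed: Replaced the per-element running-counter-with-threshold loop (adding 1 on every step once the counter reaches 5) by a run-splitting pass that peels each maximal run of equal elements and adds max(0, L - 4) per run.
import Mathlib
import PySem

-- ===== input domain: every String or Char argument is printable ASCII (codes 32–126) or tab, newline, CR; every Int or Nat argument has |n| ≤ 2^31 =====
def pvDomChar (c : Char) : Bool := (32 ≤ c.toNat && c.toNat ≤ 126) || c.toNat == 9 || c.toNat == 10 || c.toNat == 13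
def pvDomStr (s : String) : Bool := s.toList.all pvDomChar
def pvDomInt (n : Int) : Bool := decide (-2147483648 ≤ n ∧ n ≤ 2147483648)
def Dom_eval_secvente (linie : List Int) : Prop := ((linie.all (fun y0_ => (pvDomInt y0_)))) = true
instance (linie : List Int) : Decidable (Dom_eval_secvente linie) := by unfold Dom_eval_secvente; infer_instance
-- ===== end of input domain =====

-- B replaces A's per-element running counter-with-threshold by a run-splitting pass:
-- split the list into maximal runs of equal elements, add max(0, L - 4) per run (objective: simpler).

-- ===== PORT A =====
-- literal port of A's index loop: state (penalizare, count), i over range(1, lungime)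
def eval_secvente (linie : List Int) : Int :=
  ((PySem.List.pyRange 1 (linie.length : Int) 1).foldl
      (fun (st : Int × Int) i =>
        if PySem.List.pyGetD linie i 0 = PySem.List.pyGetD linie (i - 1) 0 then
          let c := st.2 + 1
          if 5 ≤ c then (st.1 + (if c = 5 then 1 else 1), c) else (st.1, c)
        else (st.1, 1))
      (0, 1)).1

-- ===== PORT B =====
-- Source B's outer while loop: peel one maximal run (the inner while = takeWhile/dropWhile), add max(L-4, 0)
def evalAltGo : List Int → Int → Int
  | [], total => total
  | x :: xs, total =>
    let run := (x :: xs).takeWhile (fun y => y == x)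
    let rest := (x :: xs).dropWhile (fun y => y == x)
    evalAltGo rest (total + max ((run.length : Int) - 4) 0)
  termination_by l _ => l.length
  decreasing_by
    simp only [List.dropWhile_cons, beq_self_eq_true, if_true]
    have := List.length_dropWhile_le (fun y => y == x) xs
    simp only [List.length_cons]; omega

def eval_secvente_alt (linie : List Int) : Int := evalAltGo linie 0

-- ===== PRECONDITION & SPEC =====
def Spec_eval_secvente (linie : List Int) (out : Int) : Prop := out = eval_secvente_alt linie
instance (linie : List Int) (out : Int) : Decidable (Spec_eval_secvente linie out) := by unfold Spec_eval_secvente; infer_instance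

-- ===== CLAIM (what is proved, stated in full; the proofs are below) =====
def Claim_equal_eval_secvente : Prop := ∀ (linie : List Int), Dom_eval_secvente linie → Spec_eval_secvente linie (eval_secvente linie)

-- ===== LEMMAS AND PROOFS =====

-- A's loop body as a function of (prev, cur)
def stepA (st : Int × Int) (prev cur : Int) : Int × Int :=
  if cur = prev then
    let c := st.2 + 1
    if 5 ≤ c then (st.1 + (if c = 5 then 1 else 1), c) else (st.1, c)
  else (st.1, 1)

lemma altGo_add : ∀ (n : Nat) (xs : List Int), xs.length = n →
    ∀ (a b : Int), evalAltGo xs (a + b) = a + evalAltGo xs b := by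
  intro n
  induction n using Nat.strong_induction_on with
  | _ n ih =>
    intro xs hlen a b
    match xs with
    | [] => simp [evalAltGo]
    | x :: ys =>
      rw [evalAltGo, evalAltGo, add_assoc]
      have hlt : ((x :: ys).dropWhile (fun y => y == x)).length < n := by
        simp only [List.dropWhile_cons, beq_self_eq_true, if_true]
        have := List.length_dropWhile_le (fun y => y == x) ys
        simp only [List.length_cons] at hlen
        omega
      exact ih _ hlt _ rfl _ _

lemma altGo_eq (xs : List Int) (t : Int) : evalAltGo xs t = t + evalAltGo xs 0 := by
  have h := altGo_add xs.length xs rfl t 0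
  simpa using h

lemma altGo_zero_add (xs : List Int) (t : Int) : evalAltGo xs (0 + t) = t + evalAltGo xs 0 := by
  rw [zero_add]; exact altGo_eq xs t

-- nat-index fold over adjacent pairs = fold over zip with tail
lemma fold_adj (g : (Int × Int) → Int → Int → (Int × Int)) :
    ∀ (xs : List Int) (init : Int × Int),
    (List.range (xs.length - 1)).foldl
        (fun st k => g st (xs.getD k 0) (xs.getD (k + 1) 0)) init
      = (xs.zip xs.tail).foldl (fun st p => g st p.1 p.2) init := by
  intro xs
  induction xs with
  | nil => intro init; simp
  | cons a ys ih =>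
    intro init
    cases ys with
    | nil => simp
    | cons b zs =>
      have hr : (a :: b :: zs).length - 1 = (b :: zs).length - 1 + 1 := by simp
      rw [hr, List.range_succ_eq_map, List.foldl_cons, List.foldl_map]
      have h := ih (init := g init a b)
      simp only [List.getD_cons_succ] at *
      simpa using h

-- A's zip-fold starting mid-run (count c, current value prev) in terms of B's run recursion
lemma runA : ∀ (xs : List Int) (prev pen c : Int), 1 ≤ c →
    (((prev :: xs).zip xs).foldl (fun st p => stepA st p.1 p.2) (pen, c)).1
      = pen + (max (c + ((xs.takeWhile (fun y => y == prev)).length : Int) - 4) 0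
                - max (c - 4) 0)
        + evalAltGo (xs.dropWhile (fun y => y == prev)) 0 := by
  intro xs
  induction xs with
  | nil => intro prev pen c hc; simp [evalAltGo]
  | cons y ys ih =>
    intro prev pen c hc
    by_cases h : y = prev
    · subst h
      have hstep : stepA (pen, c) y y = (pen + (if 5 ≤ c + 1 then (1:Int) else 0), c + 1) := by
        simp only [stepA, ite_self]
        split_ifs <;> simp
      simp only [List.zip_cons_cons, List.foldl_cons, List.takeWhile_cons,
        beq_self_eq_true, if_true, List.dropWhile_cons]
      rw [hstep, ih y _ (c + 1) (by omega)]
      simp only [List.length_cons]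
      push_cast
      split_ifs <;> omega
    · have hb : (y == prev) = false := by simp [h]
      simp only [List.zip_cons_cons, List.foldl_cons, List.takeWhile_cons, hb,
        if_false, List.dropWhile_cons, Bool.false_eq_true]
      rw [show (stepA (pen, c) prev y) = ((pen, (1:Int))) from by simp [stepA, h]]
      rw [ih y _ 1 (by omega)]
      simp only [List.length_nil, Nat.cast_zero]
      rw [evalAltGo]
      simp only [List.takeWhile_cons, beq_self_eq_true, if_true, List.dropWhile_cons,
        List.length_cons]
      rw [altGo_zero_add]
      push_cast
      omega

-- ===== VERDICT (by name: the statement is the Claim_ definition above) =====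
theorem eval_secvente_spec : Claim_equal_eval_secvente := by
  intro linie _
  unfold Spec_eval_secvente
  rw [eval_secvente, eval_secvente_alt]
  cases linie with
  | nil => simp [PySem.List.pyRange_one_eq_nil, evalAltGo]
  | cons x ys =>
    rw [PySem.List.pyRange_one]
    have hfun : (fun (st : Int × Int) (k : Nat) =>
        (fun (st : Int × Int) (i : Int) =>
          if PySem.List.pyGetD (x :: ys) i 0 = PySem.List.pyGetD (x :: ys) (i - 1) 0 then
            let c := st.2 + 1
            if 5 ≤ c then (st.1 + (if c = 5 then 1 else 1), c) else (st.1, c)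
          else (st.1, 1)) st (1 + (k : Int)))
        = fun st k => stepA st ((x :: ys).getD k 0) ((x :: ys).getD (k + 1) 0) := by
      funext st k
      beta_reduce
      have h1 : (1 : Int) + (k : Int) - 1 = ((k : Nat) : Int) := by omega
      have h2 : (1 : Int) + (k : Int) = (((k + 1 : Nat)) : Int) := by push_cast; omega
      rw [h1, h2]
      simp only [PySem.List.pyGetD_natCast, stepA]
    rw [List.foldl_map, hfun]
    have hN : (((x :: ys).length : Int) - 1).toNat = (x :: ys).length - 1 := by
      simp
    rw [hN, fold_adj, show (x :: ys).tail = ys from rfl]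
    rw [runA ys x 0 1 (by omega)]
    rw [evalAltGo]
    simp only [List.takeWhile_cons, beq_self_eq_true, if_true, List.dropWhile_cons,
      List.length_cons]
    rw [altGo_zero_add]
    push_cast
    omega
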